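-- pv_equiv track=rewrite | github.com/FernandaSouzaa/PISI2 | FlyFood/Algoritmo_genetico.py | pontos
-- ===== SOURCE A (Python) =====
-- def pontos(matriz):
--     pontos = []
--     linha = 0
--     for i in matriz:
--         coluna = 0
--         for j in i:
--             if j not in [" ", "0", "\n"]:
--                 pontos.append([j, linha, coluna])
--             if j != " ":
--                 coluna += 1
--         linha += 1
--     return pontos
-- ===== SOURCE B (Python) =====
-- def pontos(matriz):
--     res = []
--     for linha, row in enumerate(matriz):
--         for i, c in enumerate(row):
--             if c not in (' ', '0', '\n'):
--                 res.append([c, linha, i - row[:i].count(' ')])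
--     return res
-- ===== Notes on version B (the rewrite author's own statement) =====
-- stated objective: alternative
-- what changed: Removes A's manually maintained column counter entirely: B enumerates each row by original index and, for every recorded character, computes its column arithmetically as the original index minus the number of spaces in the prefix before it (row[:i].count(' ')).
import Mathlib
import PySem

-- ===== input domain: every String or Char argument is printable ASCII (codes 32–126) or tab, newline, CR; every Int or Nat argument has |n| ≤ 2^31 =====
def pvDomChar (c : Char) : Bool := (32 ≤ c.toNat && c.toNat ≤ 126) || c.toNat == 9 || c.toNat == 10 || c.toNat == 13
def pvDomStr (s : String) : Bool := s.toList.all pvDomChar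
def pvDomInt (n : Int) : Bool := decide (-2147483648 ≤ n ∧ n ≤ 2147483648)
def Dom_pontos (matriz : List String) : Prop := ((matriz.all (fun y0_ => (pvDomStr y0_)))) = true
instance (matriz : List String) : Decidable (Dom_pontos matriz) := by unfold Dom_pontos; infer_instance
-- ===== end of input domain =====

-- B drops A's hand-maintained column counter and instead computes each recorded cell's column
-- arithmetically as original-index minus spaces-in-prefix (objective: alternative, same output).

-- ===== PORT A =====
-- A's inner-loop body: conditional append, conditional column increment
def stepA (linha : Int) (t : List (String × Int × Int) × Int) (j : Char) :
    List (String × Int × Int) × Int :=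
  let pts := if ¬(j = ' ' ∨ j = '0' ∨ j = '\n') then t.1 ++ [(String.ofList [j], linha, t.2)] else t.1
  let col := if j ≠ ' ' then t.2 + 1 else t.2
  (pts, col)

-- literal transliteration: outer loop carries (pontos, linha); inner loop carries (pontos, coluna)
def pontos (matriz : List String) : List (String × Int × Int) :=
  (matriz.foldl (fun (s : List (String × Int × Int) × Int) i =>
      ((i.toList.foldl (stepA s.2) (s.1, (0 : Int))).1, s.2 + 1)) ([], (0 : Int))).1

-- ===== PORT B =====
-- B's inner-loop body over (index, char): on a hit, the column is i - row[:i].count(' ').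
-- (i comes from enumerate from 0 so i ≥ 0 and i.toNat is exact for the slice row[:i].)
def stepB (linha : Int) (row : List Char) (acc : List (String × Int × Int)) (q : Int × Char) :
    List (String × Int × Int) :=
  if ¬(q.2 = ' ' ∨ q.2 = '0' ∨ q.2 = '\n') then
    acc ++ [(String.ofList [q.2], linha, q.1 - ((row.take q.1.toNat).count ' ' : Int))]
  else acc

-- literal transliteration of Source B: enumerate rows, enumerate each row by original index
def pontos_alt (matriz : List String) : List (String × Int × Int) :=
  (PySem.List.enumerate matriz 0).foldl (fun res p =>
      (PySem.List.enumerate p.2.toList 0).foldl (stepB p.1 p.2.toList) res) []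

-- ===== PRECONDITION & SPEC =====
def Spec_pontos (matriz : List String) (out : List (String × Int × Int)) : Prop := out = pontos_alt matriz
instance (matriz : List String) (out : List (String × Int × Int)) : Decidable (Spec_pontos matriz out) := by unfold Spec_pontos; infer_instance

-- ===== CLAIM (what is proved, stated in full; the proofs are below) =====
def Claim_equal_pontos : Prop := ∀ (matriz : List String), Dom_pontos matriz → Spec_pontos matriz (pontos matriz)

-- ===== LEMMAS AND PROOFS =====

-- ===== VERDICT (by name: the statement is the Claim_ definition above) =====
-- the cells A's inner loop emits for one row, as a structural recursion
def rowPts (linha : Int) : List Char → Int → List (String × Int × Int)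
  | [], _ => []
  | c :: t, col =>
      if c = ' ' then rowPts linha t col
      else (if ¬(c = '0' ∨ c = '\n') then [(String.ofList [c], linha, col)] else []) ++ rowPts linha t (col + 1)

lemma innerA_eq (linha : Int) (l : List Char) (acc : List (String × Int × Int)) (col : Int) :
    (l.foldl (stepA linha) (acc, col)).1 = acc ++ rowPts linha l col := by
  induction l generalizing acc col with
  | nil => simp [rowPts]
  | cons c t ih =>
      rw [List.foldl_cons]
      by_cases hsp : c = ' '
      · subst hsp
        have h : stepA linha (acc, col) ' ' = (acc, col) := by simp [stepA]
        rw [h, ih]; simp [rowPts]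
      · by_cases h0 : c = '0' ∨ c = '\n'
        · have h : stepA linha (acc, col) c = (acc, col + 1) := by simp [stepA, hsp, h0]
          rw [h, ih]; simp [rowPts, hsp, h0]
        · have h : stepA linha (acc, col) c = (acc ++ [(String.ofList [c], linha, col)], col + 1) := by
            simp [stepA, hsp, h0]
          rw [h, ih]; simp [rowPts, hsp, h0]

-- B's fold over the suffix starting at index n equals A's row recursion entered with
-- column n - (spaces in the prefix of length n) — the invariant A's counter maintains.
lemma innerB_eq (linha : Int) (full : List Char) (l : List Char) (n : Nat)
    (h : full.drop n = l) (acc : List (String × Int × Int)) :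
    (PySem.List.enumerate l (n : Int)).foldl (stepB linha full) acc
      = acc ++ rowPts linha l ((n : Int) - ((full.take n).count ' ' : Int)) := by
  induction l generalizing n acc with
  | nil => simp [PySem.List.enumerate_nil, rowPts]
  | cons c t ih =>
      have hn : n < full.length := by
        by_contra hge
        simp [List.drop_eq_nil_of_le (Nat.le_of_not_lt hge)] at h
      have hget : full[n] = c := by
        have := congrArg (fun xs => xs.head?) h
        simpa [List.head?_drop, List.getElem?_eq_getElem hn] using this
      have htake : full.take (n + 1) = full.take n ++ [c] := by
        rw [List.take_succ, List.getElem?_eq_getElem hn, hget]; rfl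
      have hdrop : full.drop (n + 1) = t := by
        have := congrArg List.tail h
        simpa [List.tail_drop] using this
      rw [PySem.List.enumerate_cons, List.foldl_cons]
      have hcast : ((n : Int) + 1) = ((n + 1 : Nat) : Int) := by push_cast; ring
      by_cases hsp : c = ' '
      · subst hsp
        have hstep : stepB linha full acc ((n : Int), ' ') = acc := by simp [stepB]
        rw [hstep, hcast, ih (n + 1) hdrop]
        have : ((full.take (n + 1)).count ' ' : Int) = ((full.take n).count ' ' : Int) + 1 := by
          rw [htake]; simp [List.count_append]
        rw [this]
        have : ((n + 1 : Nat) : Int) - (((full.take n).count ' ' : Int) + 1)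
             = (n : Int) - ((full.take n).count ' ' : Int) := by push_cast; ring
        rw [this]; simp [rowPts]
      · have hcnt : ((full.take (n + 1)).count ' ' : Int) = ((full.take n).count ' ' : Int) := by
          rw [htake]; simp [List.count_append, hsp]
        by_cases h0 : c = '0' ∨ c = '\n'
        · have hstep : stepB linha full acc ((n : Int), c) = acc := by
            rcases h0 with h0 | h0 <;> simp [stepB, h0]
          rw [hstep, hcast, ih (n + 1) hdrop, hcnt]
          have : ((n + 1 : Nat) : Int) - ((full.take n).count ' ' : Int)
               = ((n : Int) - ((full.take n).count ' ' : Int)) + 1 := by push_cast; ring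
          rw [this]; simp [rowPts, hsp, h0]
        · have hstep : stepB linha full acc ((n : Int), c)
              = acc ++ [(String.ofList [c], linha, (n : Int) - ((full.take (n : Int).toNat).count ' ' : Int))] := by
            simp [stepB, hsp, h0]
          rw [hstep, hcast, ih (n + 1) hdrop, hcnt]
          have : ((n + 1 : Nat) : Int) - ((full.take n).count ' ' : Int)
               = ((n : Int) - ((full.take n).count ' ' : Int)) + 1 := by push_cast; ring
          rw [this]; simp [rowPts, hsp, h0]

lemma outer_eq (ms : List String) (acc : List (String × Int × Int)) (linha : Int) :
    (ms.foldl (fun (s : List (String × Int × Int) × Int) i =>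
        ((i.toList.foldl (stepA s.2) (s.1, (0 : Int))).1, s.2 + 1)) (acc, linha)).1
    = (PySem.List.enumerate ms linha).foldl (fun res p =>
        (PySem.List.enumerate p.2.toList 0).foldl (stepB p.1 p.2.toList) res) acc := by
  induction ms generalizing acc linha with
  | nil => simp [PySem.List.enumerate_nil]
  | cons r t ih =>
      rw [PySem.List.enumerate_cons, List.foldl_cons, List.foldl_cons, ih]
      have hB := innerB_eq linha r.toList r.toList 0 rfl acc
      simp only [Nat.cast_zero] at hB
      simp only [innerA_eq, hB]
      norm_num

-- ===== VERDICT (by name: the statement is the Claim_ definition above) =====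
theorem pontos_spec : Claim_equal_pontos := by
  intro matriz _
  show pontos matriz = pontos_alt matriz
  unfold pontos pontos_alt
  exact outer_eq matriz [] 0
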